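-- pv_equiv track=rewrite | github.com/MacKenzieOBrian/NLtoSQL | nl2sql/agent/constraint_hints.py | _find_phrase_hits
-- ===== SOURCE A (Python) =====
-- def _unique(values: list[str]) -> list[str]:
--     """Keep first-seen order while removing duplicates."""
--     out: list[str] = []
--     for v in values:
--         if v and v not in out:
--             out.append(v)
--     return out
--
-- def _find_phrase_hits(nlq: str, mapping: dict[str, str]) -> list[str]:
--     """Return mapped columns in the same order they appear in the NLQ."""
--     nl = (nlq or "").lower()
--     hits: list[tuple[int, str]] = []
--     for phrase, col in mapping.items():
--         idx = nl.find(phrase)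
--         if idx != -1:
--             hits.append((idx, col))
--     hits.sort(key=lambda x: x[0])
--     return _unique([col for _, col in hits])
-- ===== SOURCE B (Python) =====
-- def _find_phrase_hits(nlq: str, mapping: dict[str, str]) -> list[str]:
--     """Position-major scan: walk the query left to right and emit each phrase's
--     column the first time its phrase starts at the current position, deduping
--     with a set; no index list, no sort, no quadratic membership scan; phrases
--     that never occur are dropped up front, and the scan stops as soon as every
--     occurring phrase has been located."""
--     nl = (nlq or "").lower()
--     pending = [(p, c) for p, c in mapping.items() if p in nl]
--     out: list[str] = []
--     seen: set[str] = set()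
--     for i in range(len(nl) + 1):
--         if not pending:
--             break
--         remaining = []
--         for phrase, col in pending:
--             if nl.startswith(phrase, i):
--                 if col and col not in seen:
--                     seen.add(col)
--                     out.append(col)
--             else:
--                 remaining.append((phrase, col))
--         pending = remaining
--     return out
-- ===== Notes on version B (the rewrite author's own statement) =====
-- stated objective: alternative
-- what changed: A runs str.find per phrase, collects (index, column) pairs, sorts them and dedups with a quadratic list scan; B never computes indices or sorts: it drops phrases that do not occur, then walks the query positions left to right once, emitting each still-pending phrase's column the first time the phrase starts at the current position (which reproduces the stable sort-by-first-index order), deduping with a set.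
import Mathlib
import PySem

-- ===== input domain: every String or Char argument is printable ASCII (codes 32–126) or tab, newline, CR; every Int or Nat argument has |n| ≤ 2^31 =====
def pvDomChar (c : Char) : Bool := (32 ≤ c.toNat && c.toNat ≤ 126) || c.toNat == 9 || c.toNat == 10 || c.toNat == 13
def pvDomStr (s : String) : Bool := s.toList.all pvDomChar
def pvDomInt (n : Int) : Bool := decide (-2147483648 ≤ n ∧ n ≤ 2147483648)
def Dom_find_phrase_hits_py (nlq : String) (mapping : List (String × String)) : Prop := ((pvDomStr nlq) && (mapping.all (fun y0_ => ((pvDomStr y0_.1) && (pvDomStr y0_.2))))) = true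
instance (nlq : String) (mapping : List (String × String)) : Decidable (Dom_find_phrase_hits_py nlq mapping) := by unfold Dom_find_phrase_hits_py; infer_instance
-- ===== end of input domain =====

-- B replaces A's per-phrase find + sort + quadratic dedup by a single left-to-right
-- position scan that emits each column the first time its phrase matches (set dedup);
-- same return value, no sorting pass (objective: alternative, not measured faster).

-- ===== PORT A =====
-- helper _unique: keep first-seen order, drop empty strings and duplicates
def unique_py (values : List String) : List String :=
  values.foldl (fun out v => if v ≠ "" ∧ v ∉ out then out ++ [v] else out) []

def find_phrase_hits_py (nlq : String) (mapping : List (String × String)) : List String :=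
  let nl : List Char := PySem.Chars.lower nlq.toList      -- (nlq or "").lower(): "" is falsy so this is nlq.lower()
  let hits : List (Int × String) :=
    (PySem.Dict.ofList mapping).items.foldl               -- for phrase, col in mapping.items()
      (fun hits pc =>
        let idx := PySem.Chars.find nl pc.1.toList        -- idx = nl.find(phrase)
        if idx ≠ -1 then hits ++ [(idx, pc.2)] else hits) []
  unique_py ((PySem.List.sorted hits (fun x => x.1) false).map (fun x => x.2))

-- ===== PORT B =====
-- body of B's inner 'for phrase, col in pending' loop; state = (remaining, out, seen)
def altStep (nl : List Char) (i : Nat)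
    (st : List (String × String) × List String × PySem.Set String)
    (pc : String × String) : List (String × String) × List String × PySem.Set String :=
  -- nl.startswith(phrase, i): exact for 0 ≤ i — Python tests phrase against nl[i:], clamped past the end
  if PySem.Chars.startswith (List.drop i nl) pc.1.toList = true then
    if pc.2 ≠ "" ∧ ¬ (PySem.Set.contains st.2.2 pc.2 = true) then
      (st.1, st.2.1 ++ [pc.2], PySem.Set.add st.2.2 pc.2)
    else st
  else (st.1 ++ [pc], st.2.1, st.2.2)

-- B's 'for i in range(len(nl) + 1)' with its early break, as fuel recursion on the
-- remaining number of positions (fuel = len(nl) + 1 - i); exact: the loop body only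
-- runs while fuel > 0, and 'if not pending: break' is the first test of the body.
def altLoop (nl : List Char) (fuel i : Nat)
    (pending : List (String × String)) (out : List String) (seen : PySem.Set String) : List String :=
  match fuel with
  | 0 => out
  | fuel + 1 =>
    if pending = [] then out
    else
      let st := pending.foldl (altStep nl i) ([], out, seen)
      altLoop nl fuel (i + 1) st.1 st.2.1 st.2.2

def find_phrase_hits_py_alt (nlq : String) (mapping : List (String × String)) : List String :=
  let nl : List Char := PySem.Chars.lower nlq.toList
  let pending := (PySem.Dict.ofList mapping).items.filter   -- [(p, c) for p, c in mapping.items() if p in nl]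
    (fun pc => PySem.Chars.isIn pc.1.toList nl)
  altLoop nl (nl.length + 1) 0 pending [] PySem.Set.empty

-- ===== PRECONDITION & SPEC =====
def Spec_find_phrase_hits_py (nlq : String) (mapping : List (String × String)) (out : List String) : Prop := out = find_phrase_hits_py_alt nlq mapping
instance (nlq : String) (mapping : List (String × String)) (out : List String) : Decidable (Spec_find_phrase_hits_py nlq mapping out) := by unfold Spec_find_phrase_hits_py; infer_instance

-- ===== CLAIM (what is proved, stated in full; the proofs are below) =====
def Claim_equal_find_phrase_hits_py : Prop := ∀ (nlq : String) (mapping : List (String × String)), Dom_find_phrase_hits_py nlq mapping → Spec_find_phrase_hits_py nlq mapping (find_phrase_hits_py nlq mapping)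

-- ===== LEMMAS AND PROOFS =====

-- first index (Python str.find) of a pair's phrase in nl
def pvFi (nl : List Char) (pc : String × String) : Int := PySem.Chars.find nl pc.1.toList

-- the dedup accumulator step shared by A's _unique loop and B's seen-set guard
def pvUStep (out : List String) (v : String) : List String :=
  if v ≠ "" ∧ v ∉ out then out ++ [v] else out

theorem unique_py_eq_foldl (values : List String) :
    unique_py values = values.foldl pvUStep [] := rfl

-- the column groups B emits: for each position j, the pending pairs whose first match is at j
def pvGroups (nl : List Char) (pending : List (String × String)) (i fuel : Nat) : List String :=
  (List.range' i fuel).flatMap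
    (fun (j : Nat) => ((pending.filter (fun pc => decide (pvFi nl pc = (j : Int)))).map (fun pc => pc.2)))

theorem match_iff (nl : List Char) (i : Nat) (pc : String × String)
    (H : pvFi nl pc = -1 ∨ (i : Int) ≤ pvFi nl pc) :
    (PySem.Chars.startswith (List.drop i nl) pc.1.toList = true)
      ↔ pvFi nl pc = (i : Int) := by
  unfold pvFi at H ⊢
  rw [PySem.Chars.startswith_iff]
  constructor
  · intro hpre
    have hinf : pc.1.toList <:+: nl := hpre.isInfix.trans (List.drop_suffix i nl).isInfix
    have hnn : 0 ≤ PySem.Chars.find nl pc.1.toList := (PySem.Chars.find_nonneg_iff nl pc.1.toList).mpr hinf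
    have hmin := (PySem.Chars.find_spec hnn).2
    have hle : (PySem.Chars.find nl pc.1.toList).toNat ≤ i := by
      by_contra hlt
      exact hmin i (by omega) hpre
    omega
  · intro hfi
    have hnn : 0 ≤ PySem.Chars.find nl pc.1.toList := by omega
    have hpre := (PySem.Chars.find_spec hnn).1
    rw [hfi] at hpre
    simpa only [Int.toNat_natCast] using hpre

theorem inner_fold_eq (nl : List Char) (i : Nat) (pending : List (String × String))
    (rem : List (String × String)) (out : List String)
    (H1 : ∀ pc ∈ pending, pvFi nl pc = -1 ∨ (i : Int) ≤ pvFi nl pc) :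
    pending.foldl (altStep nl i) (rem, out, out) =
      (rem ++ pending.filter (fun pc => !(decide (pvFi nl pc = (i : Int)))),
       ((pending.filter (fun pc => decide (pvFi nl pc = (i : Int)))).map (fun pc => pc.2)).foldl pvUStep out,
       ((pending.filter (fun pc => decide (pvFi nl pc = (i : Int)))).map (fun pc => pc.2)).foldl pvUStep out) := by
  induction pending generalizing rem out with
  | nil => simp
  | cons pc pending ih =>
    have Hpc := H1 pc (by simp)
    have Htl : ∀ q ∈ pending, pvFi nl q = -1 ∨ (i : Int) ≤ pvFi nl q :=
      fun q hq => H1 q (by simp [hq])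
    by_cases hm : pvFi nl pc = (i : Int)
    · have hs := (match_iff nl i pc Hpc).mpr hm
      by_cases hnew : pc.2 ≠ "" ∧ pc.2 ∉ out
      · have hcon : PySem.Set.contains out pc.2 = false := by
          simp only [PySem.Set.contains]
          rw [Bool.eq_false_iff]
          intro hc
          exact hnew.2 (List.contains_iff_mem.mp hc)
        have hc' : ¬ (PySem.Set.contains out pc.2 = true) := by rw [hcon]; simp
        have hadd : PySem.Set.add out pc.2 = out ++ [pc.2] := by
          simp only [PySem.Set.add]
          rw [hcon]
          simp
        have hstep : altStep nl i (rem, out, out) pc = (rem, out ++ [pc.2], out ++ [pc.2]) := by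
          simp only [altStep]
          rw [if_pos hs, if_pos ⟨hnew.1, hc'⟩, hadd]
        have hu : pvUStep out pc.2 = out ++ [pc.2] := by rw [pvUStep, if_pos hnew]
        rw [List.foldl_cons, hstep, ih _ _ Htl]
        simp only [List.filter_cons, hm, decide_true, Bool.not_true, Bool.false_eq_true,
          if_false, if_true, List.map_cons, List.foldl_cons, hu]
      · have hcm : PySem.Set.contains out pc.2 = true ∨ pc.2 = "" := by
          rcases not_and_or.mp hnew with h | h
          · right; simpa using h
          · left
            simp only [not_not] at h
            exact List.contains_iff_mem.mpr h
        have hstep : altStep nl i (rem, out, out) pc = (rem, out, out) := by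
          simp only [altStep]
          rw [if_pos hs, if_neg (fun hc => by rcases hcm with h | h; exacts [hc.2 h, hc.1 h])]
        have hu : pvUStep out pc.2 = out := by rw [pvUStep, if_neg hnew]
        rw [List.foldl_cons, hstep, ih _ _ Htl]
        simp only [List.filter_cons, hm, decide_true, Bool.not_true, Bool.false_eq_true,
          if_false, if_true, List.map_cons, List.foldl_cons, hu]
    · have hs : ¬ (PySem.Chars.startswith (List.drop i nl) pc.1.toList = true) :=
        fun h => hm ((match_iff nl i pc Hpc).mp h)
      have hstep : altStep nl i (rem, out, out) pc = (rem ++ [pc], out, out) := by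
        simp only [altStep]
        rw [if_neg hs]
      rw [List.foldl_cons, hstep, ih _ _ Htl]
      simp only [List.filter_cons, hm, decide_false, Bool.not_false, Bool.false_eq_true,
        if_false, if_true, List.append_assoc, List.singleton_append]

theorem altLoop_eq (nl : List Char) (fuel i : Nat) (pending : List (String × String))
    (out : List String)
    (hfuel : fuel = nl.length + 1 - i)
    (H1 : ∀ pc ∈ pending, pvFi nl pc = -1 ∨ (i : Int) ≤ pvFi nl pc) :
    altLoop nl fuel i pending out out = (pvGroups nl pending i fuel).foldl pvUStep out := by
  induction fuel generalizing i pending out with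
  | zero => simp [altLoop, pvGroups]
  | succ fuel ih =>
    by_cases hp : pending = []
    · subst hp
      have hnil : List.flatMap (fun _ => ([] : List String)) (List.range' i (fuel + 1)) = [] :=
        List.flatMap_eq_nil_iff.mpr (by simp)
      simp [altLoop, pvGroups, hnil]
    · have hi : i ≤ nl.length := by omega
      have hfuel' : fuel = nl.length + 1 - (i + 1) := by omega
      rw [altLoop, if_neg hp]
      rw [inner_fold_eq nl i pending [] out H1]
      simp only [List.nil_append]
      have H1' : ∀ pc ∈ pending.filter (fun pc => !(decide (pvFi nl pc = (i : Int)))),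
          pvFi nl pc = -1 ∨ ((i : Int) + 1) ≤ pvFi nl pc := by
        intro pc hpc
        rw [List.mem_filter] at hpc
        rcases H1 pc hpc.1 with h | h
        · exact Or.inl h
        · right
          have : ¬ (pvFi nl pc = (i : Int)) := by simpa using hpc.2
          omega
      have H1'' : ∀ pc ∈ pending.filter (fun pc => !(decide (pvFi nl pc = (i : Int)))),
          pvFi nl pc = -1 ∨ ((i + 1 : Nat) : Int) ≤ pvFi nl pc := by
        intro pc hpc
        rcases H1' pc hpc with h | h
        · exact Or.inl h
        · right; push_cast; omega
      rw [ih (i + 1) _ _ hfuel' H1'']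
      -- groups of the filtered pending at positions ≥ i+1 are groups of pending
      have hgr : pvGroups nl (pending.filter (fun pc => !(decide (pvFi nl pc = (i : Int))))) (i + 1) fuel
          = pvGroups nl pending (i + 1) fuel := by
        unfold pvGroups
        refine List.flatMap_congr (l := List.range' (i + 1) fuel) ?_
        intro j hj
        rw [List.mem_range'_1] at hj
        congr 1
        rw [List.filter_filter]
        apply List.filter_congr
        intro pc _
        by_cases h : pvFi nl pc = (j : Int)
        · have : ¬ (pvFi nl pc = (i : Int)) := by
            rw [h]
            intro hc
            have : j = i := by exact_mod_cast hc
            omega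
          simp only [h, decide_true]
          simp
          omega
        · simp [h]
      rw [hgr]
      have hrange : List.range' i (fuel + 1) = i :: List.range' (i + 1) fuel := by
        rw [List.range'_succ]
      unfold pvGroups
      rw [hrange, List.flatMap_cons, List.foldl_append]

theorem insertBy_split {α : Type} (b : α → α → Bool) (x : α) (ys zs : List α)
    (hys : ∀ y ∈ ys, b x y = false) (hzs : ∀ z ∈ zs, b x z = true) :
    PySem.List.insertBy b x (ys ++ zs) = ys ++ x :: zs := by
  induction ys with
  | nil =>
    simp only [List.nil_append]
    cases zs with
    | nil => rfl
    | cons z zs => simp [PySem.List.insertBy, hzs z (by simp)]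
  | cons y ys ih =>
    have hy : b x y = false := hys y (by simp)
    simp only [List.cons_append, PySem.List.insertBy, hy]
    simp only [ih (fun y hy => hys y (by simp [hy])), Bool.false_eq_true, if_false]

def pvG {β : Type} (N : Nat) (m : List (Int × β)) : List (Int × β) :=
  (List.range' 0 (N + 1)).flatMap (fun (j : Nat) => m.filter (fun x => decide (x.1 = (j : Int))))

theorem ins_group {β : Type} (N : Nat) (m : List (Int × β)) (x : Int × β)
    (hx0 : 0 ≤ x.1) (hxN : x.1 ≤ (N : Int)) :
    PySem.List.insertBy (fun a b => decide (a.1 < b.1)) x (pvG N m) = pvG N (m ++ [x]) := by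
  set k := x.1.toNat with hk
  have hkx : (k : Int) = x.1 := Int.toNat_of_nonneg hx0
  have hkN : k ≤ N := by omega
  have h1 : List.range' 0 k ++ List.range' k 1 = List.range' 0 (k + 1) := by
    have := List.range'_append (s := 0) (m := k) (n := 1) (step := 1)
    simpa using this
  have h2 : List.range' 0 (k + 1) ++ List.range' (k + 1) (N - k) = List.range' 0 (N + 1) := by
    have := List.range'_append (s := 0) (m := k + 1) (n := N - k) (step := 1)
    simp only [Nat.one_mul, Nat.zero_add] at this
    rw [this]
    congr 1
    omega
  have hsplit : List.range' 0 (N + 1) = (List.range' 0 k ++ [k]) ++ List.range' (k + 1) (N - k) := by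
    rw [← h2, ← h1]
    rfl
  have hfx : ∀ (j : Nat), j ≠ k → List.filter (fun y => decide (y.1 = (j : Int))) [x] = [] := by
    intro j hj
    simp only [List.filter_cons, List.filter_nil]
    have : ¬ (x.1 = (j : Int)) := by omega
    simp [this]
  have hfk : List.filter (fun y => decide (y.1 = (k : Int))) [x] = [x] := by
    simp [hkx]
  unfold pvG
  rw [hsplit]
  simp only [List.flatMap_append, List.flatMap_cons, List.flatMap_nil, List.append_nil]
  have hcong1 : (List.range' 0 k).flatMap
        (fun (j : Nat) => (m ++ [x]).filter (fun y => decide (y.1 = (j : Int))))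
      = (List.range' 0 k).flatMap (fun (j : Nat) => m.filter (fun y => decide (y.1 = (j : Int)))) := by
    refine List.flatMap_congr (l := List.range' 0 k) ?_
    intro j hj
    rw [List.mem_range'_1] at hj
    rw [List.filter_append, hfx j (by omega), List.append_nil]
  have hcong2 : (List.range' (k + 1) (N - k)).flatMap
        (fun (j : Nat) => (m ++ [x]).filter (fun y => decide (y.1 = (j : Int))))
      = (List.range' (k + 1) (N - k)).flatMap (fun (j : Nat) => m.filter (fun y => decide (y.1 = (j : Int)))) := by
    refine List.flatMap_congr (l := List.range' (k + 1) (N - k)) ?_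
    intro j hj
    rw [List.mem_range'_1] at hj
    rw [List.filter_append, hfx j (by omega), List.append_nil]
  rw [hcong1, hcong2, List.filter_append, hfk]
  rw [← List.append_assoc]
  rw [List.append_assoc _ [x] _, List.singleton_append]
  refine insertBy_split _ x _ _ ?_ ?_
  · intro y hy
    have hy1 : y.1 ≤ x.1 := by
      rcases List.mem_append.mp hy with hy | hy
      · rcases List.mem_flatMap.mp hy with ⟨j, hj, hyj⟩
        rw [List.mem_range'_1] at hj
        have := (List.mem_filter.mp hyj).2
        have : y.1 = (j : Int) := by simpa using this
        omega
      · have := (List.mem_filter.mp hy).2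
        have : y.1 = (k : Int) := by simpa using this
        omega
    simpa using by omega
  · intro z hz
    rcases List.mem_flatMap.mp hz with ⟨j, hj, hzj⟩
    rw [List.mem_range'_1] at hj
    have : z.1 = (j : Int) := by simpa using (List.mem_filter.mp hzj).2
    simp only [decide_eq_true_eq]
    omega

theorem foldl_ins_group {β : Type} (N : Nat) (l m : List (Int × β))
    (hb : ∀ x ∈ l, 0 ≤ x.1 ∧ x.1 ≤ (N : Int)) :
    l.foldl (fun acc x => PySem.List.insertBy (fun a b => decide (a.1 < b.1)) x acc) (pvG N m)
      = pvG N (m ++ l) := by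
  induction l generalizing m with
  | nil => simp
  | cons x l ih =>
    rw [List.foldl_cons, ins_group N m x (hb x (by simp)).1 (hb x (by simp)).2,
      ih (m ++ [x]) (fun y hy => hb y (by simp [hy])), List.append_assoc, List.singleton_append]

theorem sorted_eq_groups {β : Type} (N : Nat) (l : List (Int × β))
    (hb : ∀ x ∈ l, 0 ≤ x.1 ∧ x.1 ≤ (N : Int)) :
    PySem.List.sorted l (fun x => x.1) false =
      (List.range' 0 (N + 1)).flatMap
        (fun (j : Nat) => l.filter (fun x => decide (x.1 = (j : Int)))) := by
  rw [PySem.List.sorted_eq_foldl_insertBy]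
  have hnil : pvG N ([] : List (Int × β)) = [] := by
    unfold pvG
    exact List.flatMap_eq_nil_iff.mpr (by simp)
  have := foldl_ins_group N l [] hb
  rw [hnil] at this
  simpa [pvG] using this

-- ===== VERDICT (by name: the statement is the Claim_ definition above) =====
theorem find_phrase_hits_py_spec : Claim_equal_find_phrase_hits_py := by
  intro nlq mapping _
  unfold Spec_find_phrase_hits_py find_phrase_hits_py find_phrase_hits_py_alt
  dsimp only
  set nl := PySem.Chars.lower nlq.toList with hnl
  set items := (PySem.Dict.ofList mapping).items with hitems
  -- B's side: the scan collects the groups of columns position by position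
  have hB : altLoop nl (nl.length + 1) 0
        (items.filter (fun pc => PySem.Chars.isIn pc.1.toList nl)) [] PySem.Set.empty
      = (pvGroups nl items 0 (nl.length + 1)).foldl pvUStep [] := by
    have hempty : (PySem.Set.empty : PySem.Set String) = [] := rfl
    rw [hempty]
    rw [altLoop_eq nl (nl.length + 1) 0 _ [] (by omega)
      (fun pc _ => by
        have := PySem.Chars.neg_one_le_find nl pc.1.toList
        unfold pvFi
        omega)]
    -- dropping the never-occurring phrases does not change any position group
    congr 1
    unfold pvGroups
    refine List.flatMap_congr (l := List.range' 0 (nl.length + 1)) ?_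
    intro j _
    congr 1
    rw [List.filter_filter]
    apply List.filter_congr
    intro pc _
    by_cases h : pvFi nl pc = (j : Int)
    · have hin : PySem.Chars.isIn pc.1.toList nl = true := by
        rw [PySem.Chars.isIn_iff_infix, ← PySem.Chars.find_nonneg_iff]
        unfold pvFi at h
        omega
      simp [h, hin]
    · simp [h]
  rw [hB]
  -- A's side: hits-collecting loop is a filter + map
  have hA : items.foldl
      (fun hits pc =>
        let idx := PySem.Chars.find nl pc.1.toList
        if idx ≠ -1 then hits ++ [(idx, pc.2)] else hits) ([] : List (Int × String))
      = (items.filter (fun pc => decide (pvFi nl pc ≠ -1))).map (fun pc => (pvFi nl pc, pc.2)) := by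
    have := PySem.List.foldl_append_ite (fun pc : String × String => pvFi nl pc ≠ -1)
      (fun pc => (pvFi nl pc, pc.2)) items ([] : List (Int × String))
    simpa [pvFi] using this
  rw [hA]
  -- the stable sort of the hits is the same concatenation of position groups
  rw [sorted_eq_groups nl.length
    ((items.filter (fun pc => decide (pvFi nl pc ≠ -1))).map (fun pc => (pvFi nl pc, pc.2)))
    (by
      intro x hx
      rcases List.mem_map.mp hx with ⟨pc, hpc, rfl⟩
      have hne : pvFi nl pc ≠ -1 := by simpa using (List.mem_filter.mp hpc).2
      have h1 := PySem.Chars.neg_one_le_find nl pc.1.toList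
      have h2 := PySem.Chars.find_le_length nl pc.1.toList
      unfold pvFi at hne ⊢
      constructor <;> [omega; exact h2])]
  rw [unique_py_eq_foldl, List.map_flatMap]
  unfold pvGroups
  congr 1
  refine List.flatMap_congr (l := List.range' 0 (nl.length + 1)) ?_
  intro j _
  rw [List.filter_map, List.map_map]
  have hcomp : ((fun x : Int × String => decide (x.1 = (j : Int))) ∘
      (fun pc : String × String => (pvFi nl pc, pc.2)))
      = fun pc : String × String => decide (pvFi nl pc = (j : Int)) := rfl
  have hsnd : ((fun x : Int × String => x.2) ∘
      (fun pc : String × String => (pvFi nl pc, pc.2)))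
      = fun pc : String × String => pc.2 := rfl
  rw [hcomp, hsnd, List.filter_filter]
  congr 1
  apply List.filter_congr
  intro pc _
  by_cases h : pvFi nl pc = (j : Int)
  · simp [h]
  · simp [h]
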